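-- pv_equiv track=rewrite | github.com/KristianMischke/CMSC473FinalProject | tokenizer.py | convert_token_sequences_to_ids
-- ===== SOURCE A (Python) =====
-- def convert_token_sequences_to_ids(sequences, bos=None, eos=None, oov_thresh=0, oov=None):
--     translation_table = {}
--     token_lookup = []
--     out_sequences = []
--     if bos is not None:
--         translation_table[bos] = len(translation_table)
--         token_lookup.append(bos)
--     if eos is not None and eos != bos:
--         translation_table[eos] = len(translation_table)
--         token_lookup.append(eos)
--     if oov is not None:
--         translation_table[oov] = len(translation_table)
--         token_lookup.append(oov)
--
--     # first get counts to be used in OOV calculation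
--     token_counts = {}
--     for sequence in sequences:
--         for token in sequence:
--             if token in token_counts:
--                 token_counts[token] += 1
--             else:
--                 token_counts[token] = 1
--
--     # convert the sequence to ids, generating new ids when new tokens are encountered
--     for sequence in sequences:
--         new_sequence = []
--         if bos is not None:
--             new_sequence.append(translation_table[bos])
--         for token in sequence:
--             if token_counts[token] <= oov_thresh:
--                 new_sequence.append(translation_table[oov])
--             else:
--                 if token not in translation_table:
--                     translation_table[token] = len(translation_table)
--                     token_lookup.append(token)
--                 new_sequence.append(translation_table[token])
--         if eos is not None:
--             new_sequence.append(translation_table[eos])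
--         out_sequences.append(new_sequence)
--     return out_sequences, translation_table, token_lookup
-- ===== SOURCE B (Python) =====
-- def convert_token_sequences_to_ids(sequences, bos=None, eos=None, oov_thresh=0, oov=None):
--     translation_table = {}
--     token_lookup = []
--     if bos is not None:
--         translation_table[bos] = len(translation_table)
--         token_lookup.append(bos)
--     if eos is not None and eos != bos:
--         translation_table[eos] = len(translation_table)
--         token_lookup.append(eos)
--     if oov is not None:
--         translation_table[oov] = len(translation_table)
--         token_lookup.append(oov)
--
--     # count pass
--     token_counts = {}
--     for sequence in sequences:
--         for token in sequence:
--             token_counts[token] = token_counts.get(token, 0) + 1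
--
--     # vocabulary-building pass: assign ids to kept tokens in first-encounter order
--     for sequence in sequences:
--         for token in sequence:
--             if token_counts[token] > oov_thresh and token not in translation_table:
--                 translation_table[token] = len(translation_table)
--                 token_lookup.append(token)
--
--     # pure mapping pass: the table is never mutated here
--     head = [translation_table[bos]] if bos is not None else []
--     tail = [translation_table[eos]] if eos is not None else []
--     out_sequences = [
--         head
--         + [translation_table[oov if token_counts[t] <= oov_thresh else t] for t in sequence]
--         + tail
--         for sequence in sequences
--     ]
--     return out_sequences, translation_table, token_lookup
-- ===== Notes on version B (the rewrite author's own statement) =====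
-- stated objective: alternative
-- what changed: A assigns new vocabulary ids inside the emission loop (table mutation interleaved with output); B separates them into a dedicated vocabulary-building pass over the counted tokens and a final pure mapping pass that only looks ids up and never mutates the table.
import Mathlib
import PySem

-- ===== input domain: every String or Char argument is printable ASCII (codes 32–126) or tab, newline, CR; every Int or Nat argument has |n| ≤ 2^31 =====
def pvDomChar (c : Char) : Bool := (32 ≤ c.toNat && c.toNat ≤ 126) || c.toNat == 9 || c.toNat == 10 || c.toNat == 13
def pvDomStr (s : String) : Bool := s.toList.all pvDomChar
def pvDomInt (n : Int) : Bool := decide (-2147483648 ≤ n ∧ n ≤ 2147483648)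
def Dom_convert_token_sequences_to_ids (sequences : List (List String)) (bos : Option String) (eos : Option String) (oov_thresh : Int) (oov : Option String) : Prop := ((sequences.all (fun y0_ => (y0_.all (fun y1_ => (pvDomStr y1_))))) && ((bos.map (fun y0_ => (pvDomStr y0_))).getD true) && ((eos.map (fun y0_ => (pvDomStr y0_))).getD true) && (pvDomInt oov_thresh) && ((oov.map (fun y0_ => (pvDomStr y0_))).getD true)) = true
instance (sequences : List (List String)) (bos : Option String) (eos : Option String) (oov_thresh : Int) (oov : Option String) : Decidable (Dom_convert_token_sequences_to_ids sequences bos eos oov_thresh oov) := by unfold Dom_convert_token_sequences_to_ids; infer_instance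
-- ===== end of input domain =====

-- B splits A's combined build+emit loop into a vocabulary-building pass over a counted index followed
-- by a pure mapping pass that never mutates the table (objective: alternative decomposition, same cost).

-- ===== PORT A =====
-- the three special-token init blocks (these lines are identical in A and in B, so the helper is shared)
def pvInitTable (bos eos oov : Option String) : PySem.Dict String Int × List String :=
  let st : PySem.Dict String Int × List String := (PySem.Dict.empty, [])
  let st := match bos with
    | some b => (st.1.insert b (st.1.size : Int), st.2 ++ [b])
    | none => st
  let st := match eos with
    | some e => if bos ≠ some e then (st.1.insert e (st.1.size : Int), st.2 ++ [e]) else st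
    | none => st
  let st := match oov with
    | some o => (st.1.insert o (st.1.size : Int), st.2 ++ [o])
    | none => st
  st

-- 'if token in token_counts: token_counts[token] += 1 else: token_counts[token] = 1'
def pvCountsA (sequences : List (List String)) : PySem.Dict String Int :=
  sequences.foldl (fun c seq => seq.foldl (fun c tok =>
    if c.contains tok then c.insert tok (c.getD tok 0 + 1) else c.insert tok 1) c) PySem.Dict.empty

-- body of A's token loop: state = (translation_table, token_lookup, new_sequence)
def pvEmitTokA (counts : PySem.Dict String Int) (oov_thresh : Int) (oov : Option String)
    (st : PySem.Dict String Int × List String × List Int) (tok : String) :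
    PySem.Dict String Int × List String × List Int :=
  if counts.getD tok 0 ≤ oov_thresh then
    -- translation_table[oov]: with oov = None Python raises KeyError here (excluded by Pre_); 0 is a dummy
    (st.1, st.2.1, st.2.2 ++ [match oov with | some o => st.1.getD o 0 | none => 0])
  else
    let tl := if st.1.contains tok then (st.1, st.2.1)
              else (st.1.insert tok (st.1.size : Int), st.2.1 ++ [tok])
    (tl.1, tl.2, st.2.2 ++ [tl.1.getD tok 0])

-- body of A's sequence loop: state = (translation_table, token_lookup, out_sequences)
def pvEmitSeqA (counts : PySem.Dict String Int) (oov_thresh : Int) (bos eos oov : Option String)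
    (st : PySem.Dict String Int × List String × List (List Int)) (seq : List String) :
    PySem.Dict String Int × List String × List (List Int) :=
  let ns0 : List Int := match bos with | some b => [st.1.getD b 0] | none => []
  let r := seq.foldl (pvEmitTokA counts oov_thresh oov) (st.1, st.2.1, ns0)
  let ns := match eos with | some e => r.2.2 ++ [r.1.getD e 0] | none => r.2.2
  (r.1, r.2.1, st.2.2 ++ [ns])

def convert_token_sequences_to_ids (sequences : List (List String)) (bos : Option String) (eos : Option String) (oov_thresh : Int) (oov : Option String) : List (List Int) × (List (String × Int)) × List String :=
  let init := pvInitTable bos eos oov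
  let counts := pvCountsA sequences
  let r := sequences.foldl (pvEmitSeqA counts oov_thresh bos eos oov)
    (init.1, init.2, ([] : List (List Int)))
  (r.2.2, r.1.items, r.2.1)

-- ===== PORT B =====
-- 'token_counts[token] = token_counts.get(token, 0) + 1'
def pvCountsB (sequences : List (List String)) : PySem.Dict String Int :=
  sequences.foldl (fun c seq => seq.foldl (fun c tok => c.insert tok (c.getD tok 0 + 1)) c)
    PySem.Dict.empty

-- body of B's vocabulary-building pass: state = (translation_table, token_lookup)
def pvBuildTok (counts : PySem.Dict String Int) (oov_thresh : Int)
    (st : PySem.Dict String Int × List String) (tok : String) :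
    PySem.Dict String Int × List String :=
  if oov_thresh < counts.getD tok 0 ∧ st.1.contains tok = false then
    (st.1.insert tok (st.1.size : Int), st.2 ++ [tok])
  else st

-- 'translation_table[oov if token_counts[t] <= oov_thresh else t]' (oov = None low-count: Python KeyError, excluded by Pre_)
def pvMapTok (counts : PySem.Dict String Int) (oov_thresh : Int) (oov : Option String)
    (T : PySem.Dict String Int) (tok : String) : Int :=
  if counts.getD tok 0 ≤ oov_thresh then
    match oov with | some o => T.getD o 0 | none => 0
  else T.getD tok 0

def convert_token_sequences_to_ids_alt (sequences : List (List String)) (bos : Option String) (eos : Option String) (oov_thresh : Int) (oov : Option String) : List (List Int) × (List (String × Int)) × List String :=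
  let init := pvInitTable bos eos oov
  let counts := pvCountsB sequences
  let tl := sequences.foldl (fun st seq => seq.foldl (pvBuildTok counts oov_thresh) st) init
  let head : List Int := match bos with | some b => [tl.1.getD b 0] | none => []
  let tail : List Int := match eos with | some e => [tl.1.getD e 0] | none => []
  let outs := sequences.map (fun seq => head ++ seq.map (pvMapTok counts oov_thresh oov tl.1) ++ tail)
  (outs, tl.1.items, tl.2)

-- ===== PRECONDITION & SPEC =====
-- Pre_ excludes exactly the inputs where A raises KeyError: oov is None while some token's total
-- count is ≤ oov_thresh (A then looks up translation_table[None]); B raises there too.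
def Pre_convert_token_sequences_to_ids (sequences : List (List String)) (bos : Option String) (eos : Option String) (oov_thresh : Int) (oov : Option String) : Prop :=
  oov = none → ∀ t ∈ sequences.flatten, oov_thresh < (sequences.flatten.count t : Int)
instance (sequences : List (List String)) (bos : Option String) (eos : Option String) (oov_thresh : Int) (oov : Option String) : Decidable (Pre_convert_token_sequences_to_ids sequences bos eos oov_thresh oov) := by unfold Pre_convert_token_sequences_to_ids; infer_instance

def pvWitness_convert_token_sequences_to_ids : List (List String) × Option String × Option String × Int × Option String :=
  ([["a", "b", "a"]], some "<s>", some "</s>", (1 : Int), some "<oov>")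

def Spec_convert_token_sequences_to_ids (sequences : List (List String)) (bos : Option String) (eos : Option String) (oov_thresh : Int) (oov : Option String) (out : List (List Int) × (List (String × Int)) × List String) : Prop := out = convert_token_sequences_to_ids_alt sequences bos eos oov_thresh oov
instance (sequences : List (List String)) (bos : Option String) (eos : Option String) (oov_thresh : Int) (oov : Option String) (out : List (List Int) × (List (String × Int)) × List String) : Decidable (Spec_convert_token_sequences_to_ids sequences bos eos oov_thresh oov out) := by unfold Spec_convert_token_sequences_to_ids; infer_instance

-- ===== CLAIM (what is proved, stated in full; the proofs are below) =====
def Claim_equal_convert_token_sequences_to_ids : Prop := ∀ (sequences : List (List String)) (bos : Option String) (eos : Option String) (oov_thresh : Int) (oov : Option String), Dom_convert_token_sequences_to_ids sequences bos eos oov_thresh oov → Pre_convert_token_sequences_to_ids sequences bos eos oov_thresh oov → Spec_convert_token_sequences_to_ids sequences bos eos oov_thresh oov (convert_token_sequences_to_ids sequences bos eos oov_thresh oov)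

-- ===== LEMMAS AND PROOFS =====

-- 'extends': every binding of t is still a binding of t'
def pvExt (t t' : PySem.Dict String Int) : Prop :=
  ∀ k v, t.get? k = some v → t'.get? k = some v

lemma pvExt_refl (t : PySem.Dict String Int) : pvExt t t := fun _ _ h => h

lemma pvExt_trans {a b c : PySem.Dict String Int} (h1 : pvExt a b) (h2 : pvExt b c) : pvExt a c :=
  fun k v h => h2 k v (h1 k v h)

lemma pvExt_contains {t t' : PySem.Dict String Int} (h : pvExt t t') {k : String}
    (hc : t.contains k = true) : t'.contains k = true := by
  rw [PySem.Dict.contains_eq_isSome_get?] at hc ⊢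
  obtain ⟨v, hv⟩ := Option.isSome_iff_exists.mp hc
  rw [h k v hv]; rfl

lemma pvExt_getD {t t' : PySem.Dict String Int} (h : pvExt t t') {k : String}
    (hc : t.contains k = true) : t.getD k 0 = t'.getD k 0 := by
  rw [PySem.Dict.contains_eq_isSome_get?] at hc
  obtain ⟨v, hv⟩ := Option.isSome_iff_exists.mp hc
  rw [PySem.Dict.getD_of_get?_eq_some _ _ hv, PySem.Dict.getD_of_get?_eq_some _ _ (h k v hv)]

lemma pvBuild_ext (counts : PySem.Dict String Int) (th : Int)
    (st : PySem.Dict String Int × List String) (tok : String) :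
    pvExt st.1 (pvBuildTok counts th st tok).1 := by
  unfold pvBuildTok
  split
  · next hcond =>
    intro k v hk
    have hne : k ≠ tok := by
      intro he; subst he
      have h2 := hcond.2
      rw [PySem.Dict.contains_eq_isSome_get?, hk] at h2
      simp at h2
    rw [PySem.Dict.get?_insert_of_ne _ _ hne]
    exact hk
  · exact pvExt_refl _

lemma pvBuildFold_ext (counts : PySem.Dict String Int) (th : Int) :
    ∀ (s : List String) (st : PySem.Dict String Int × List String),
      pvExt st.1 (s.foldl (pvBuildTok counts th) st).1 := by
  intro s
  induction s with
  | nil => intro st; exact pvExt_refl _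
  | cons x s ih =>
    intro st
    exact pvExt_trans (pvBuild_ext counts th st x) (ih _)

lemma pvBuildFolds_ext (counts : PySem.Dict String Int) (th : Int) :
    ∀ (ss : List (List String)) (st : PySem.Dict String Int × List String),
      pvExt st.1 (ss.foldl (fun st seq => seq.foldl (pvBuildTok counts th) st) st).1 := by
  intro ss
  induction ss with
  | nil => intro st; exact pvExt_refl _
  | cons s ss ih =>
    intro st
    exact pvExt_trans (pvBuildFold_ext counts th s st) (ih _)

-- A's count loop and B's count loop build the same dict
lemma pvCounts_eq (sequences : List (List String)) : pvCountsA sequences = pvCountsB sequences := by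
  unfold pvCountsA pvCountsB
  apply PySem.List.foldl_congr_mem
  intro c seq _
  apply PySem.List.foldl_congr_mem
  intro c tok _
  by_cases h : c.contains tok = true
  · simp [h]
  · simp only [Bool.not_eq_true] at h
    rw [if_neg (by simp [h]), PySem.Dict.getD_of_not_contains _ _ h]
    norm_num

lemma pvCountsB_getD (sequences : List (List String)) (tok : String) :
    (pvCountsB sequences).getD tok 0 = (sequences.flatten.count tok : Int) := by
  unfold pvCountsB
  rw [← List.foldl_flatten]
  rw [PySem.Dict.getD_foldl_insert_add_one]
  simp [PySem.Dict.getD_empty]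

-- the inner token loop of A = the build step + the pure map against the final table T
lemma pvEmit_fold (counts : PySem.Dict String Int) (th : Int) (oov : Option String)
    (T : PySem.Dict String Int) :
    ∀ (s : List String) (t : PySem.Dict String Int) (l : List String) (ns : List Int),
      (∀ tok ∈ s, counts.getD tok 0 ≤ th → oov.isSome = true) →
      (∀ o, oov = some o → t.contains o = true) →
      pvExt (s.foldl (pvBuildTok counts th) (t, l)).1 T →
      s.foldl (pvEmitTokA counts th oov) (t, l, ns)
        = ((s.foldl (pvBuildTok counts th) (t, l)).1,
           (s.foldl (pvBuildTok counts th) (t, l)).2,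
           ns ++ s.map (pvMapTok counts th oov T)) := by
  intro s
  induction s with
  | nil => intro t l ns _ _ _; simp
  | cons x s ih =>
    intro t l ns hlow hoov hf
    simp only [List.foldl_cons, List.map_cons] at hf ⊢
    by_cases hx : counts.getD x 0 ≤ th
    · -- low-count token: the state is unchanged, the oov id is emitted
      obtain ⟨o, ho⟩ := Option.isSome_iff_exists.mp (hlow x (by simp) hx)
      have hbuild : pvBuildTok counts th (t, l) x = (t, l) := by
        unfold pvBuildTok; rw [if_neg]; intro h; exact absurd h.1 (not_lt.mpr hx)
      have hemit : pvEmitTokA counts th oov (t, l, ns) x = (t, l, ns ++ [t.getD o 0]) := by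
        unfold pvEmitTokA; rw [if_pos hx]; rw [ho]
      rw [hbuild] at hf ⊢
      have hextT : pvExt t T := pvExt_trans (pvBuildFold_ext counts th s (t, l)) hf
      have hgd : t.getD o 0 = T.getD o 0 := pvExt_getD hextT (hoov o ho)
      rw [hemit, hgd, ih t l (ns ++ [T.getD o 0]) (fun tok hm => hlow tok (by simp [hm])) hoov hf]
      simp [pvMapTok, hx, ho, List.append_assoc]
    · by_cases hc : t.contains x = true
      · -- kept token already in the table
        have hbuild : pvBuildTok counts th (t, l) x = (t, l) := by
          unfold pvBuildTok; rw [if_neg]; intro h; rw [hc] at h; exact absurd h.2 (by simp)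
        have hemit : pvEmitTokA counts th oov (t, l, ns) x = (t, l, ns ++ [t.getD x 0]) := by
          unfold pvEmitTokA; rw [if_neg hx]; simp [hc]
        rw [hbuild] at hf ⊢
        have hextT : pvExt t T := pvExt_trans (pvBuildFold_ext counts th s (t, l)) hf
        have hgd : t.getD x 0 = T.getD x 0 := pvExt_getD hextT hc
        rw [hemit, hgd, ih t l _ (fun tok hm => hlow tok (by simp [hm])) hoov hf]
        simp [pvMapTok, hx, List.append_assoc]
      · -- kept token, fresh insertion
        simp only [Bool.not_eq_true] at hc
        have hbuild : pvBuildTok counts th (t, l) x = (t.insert x (t.size : Int), l ++ [x]) := by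
          unfold pvBuildTok; rw [if_pos ⟨not_le.mp hx, hc⟩]
        have hemit : pvEmitTokA counts th oov (t, l, ns) x
            = (t.insert x (t.size : Int), l ++ [x], ns ++ [(t.size : Int)]) := by
          unfold pvEmitTokA; rw [if_neg hx]; simp [hc, PySem.Dict.getD_insert_self]
        rw [hbuild] at hf ⊢
        have hext1 : pvExt (t.insert x (t.size : Int)) T :=
          pvExt_trans (pvBuildFold_ext counts th s (t.insert x (t.size : Int), l ++ [x])) hf
        have hTx : T.getD x 0 = (t.size : Int) := by
          have hg := hext1 x (t.size : Int) (PySem.Dict.get?_insert_self t x _)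
          rw [PySem.Dict.getD_of_get?_eq_some _ _ hg]
        have hoov' : ∀ o, oov = some o → (t.insert x (t.size : Int)).contains o = true := by
          intro o ho
          rw [PySem.Dict.contains_insert]
          simp [hoov o ho]
        rw [hemit, ih _ _ _ (fun tok hm => hlow tok (by simp [hm])) hoov' hf]
        simp [pvMapTok, hx, hTx, List.append_assoc]

-- the bos/eos id prefix/suffix read off a table (proof-side abbreviation)
def pvHeadB (d : PySem.Dict String Int) (z : Option String) : List Int :=
  match z with | some b => [d.getD b 0] | none => []

lemma pvBos_bridge (d : PySem.Dict String Int) (z : Option String) :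
    (match z with | some b => [d.getD b 0] | none => ([] : List Int)) = pvHeadB d z := rfl

lemma pvEos_bridge (d : PySem.Dict String Int) (z : Option String) (ns : List Int) :
    (match z with | some e => ns ++ [d.getD e 0] | none => ns) = ns ++ pvHeadB d z := by
  cases z <;> simp [pvHeadB]

-- the sequence loop of A = the whole build fold + per-sequence pure mapping against T
lemma pvEmit_seqs (counts : PySem.Dict String Int) (th : Int) (bos eos oov : Option String)
    (T : PySem.Dict String Int) :
    ∀ (ss : List (List String)) (t : PySem.Dict String Int) (l : List String)
      (outs : List (List Int)),
      (∀ seq ∈ ss, ∀ tok ∈ seq, counts.getD tok 0 ≤ th → oov.isSome = true) →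
      (∀ o, oov = some o → t.contains o = true) →
      (∀ b, bos = some b → t.contains b = true) →
      (∀ e, eos = some e → t.contains e = true) →
      pvExt (ss.foldl (fun st seq => seq.foldl (pvBuildTok counts th) st) (t, l)).1 T →
      ss.foldl (pvEmitSeqA counts th bos eos oov) (t, l, outs)
        = ((ss.foldl (fun st seq => seq.foldl (pvBuildTok counts th) st) (t, l)).1,
           (ss.foldl (fun st seq => seq.foldl (pvBuildTok counts th) st) (t, l)).2,
           outs ++ ss.map (fun seq =>
             pvHeadB T bos ++ seq.map (pvMapTok counts th oov T) ++ pvHeadB T eos)) := by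
  intro ss
  induction ss with
  | nil => intro t l outs _ _ _ _ _; simp
  | cons seq ss ih =>
    intro t l outs hlow hoov hb he hf
    simp only [List.foldl_cons, List.map_cons] at hf ⊢
    have hfin : pvExt (seq.foldl (pvBuildTok counts th) (t, l)).1 T :=
      pvExt_trans (pvBuildFolds_ext counts th ss _) hf
    have hextT : pvExt t T := pvExt_trans (pvBuildFold_ext counts th seq (t, l)) hfin
    have hb' : pvHeadB t bos = pvHeadB T bos := by
      cases bos with
      | none => rfl
      | some b => simp [pvHeadB, pvExt_getD hextT (hb b rfl)]
    have heos : pvHeadB (seq.foldl (pvBuildTok counts th) (t, l)).1 eos = pvHeadB T eos := by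
      cases eos with
      | none => rfl
      | some e =>
        simp [pvHeadB,
          pvExt_getD hfin (pvExt_contains (pvBuildFold_ext counts th seq (t, l)) (he e rfl))]
    have hseqstep : pvEmitSeqA counts th bos eos oov (t, l, outs) seq
        = ((seq.foldl (pvBuildTok counts th) (t, l)).1,
           (seq.foldl (pvBuildTok counts th) (t, l)).2,
           outs ++ [pvHeadB T bos ++ seq.map (pvMapTok counts th oov T) ++ pvHeadB T eos]) := by
      simp only [pvEmitSeqA]
      rw [pvBos_bridge, hb', pvEmit_fold counts th oov T seq t l _ (hlow seq (by simp)) hoov hfin]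
      rw [pvEos_bridge, heos]
    have hmono : ∀ k, t.contains k = true →
        (seq.foldl (pvBuildTok counts th) (t, l)).1.contains k = true := by
      intro k hk
      exact pvExt_contains (pvBuildFold_ext counts th seq (t, l)) hk
    rw [hseqstep, ih _ _ _ (fun s hm => hlow s (by simp [hm]))
      (fun o hoo => hmono _ (hoov o hoo)) (fun b hbb => hmono _ (hb b hbb))
      (fun e hee => hmono _ (he e hee)) hf]
    simp

-- the special tokens are in the initial table
lemma pvInit_contains (bos eos oov : Option String) :
    (∀ b, bos = some b → (pvInitTable bos eos oov).1.contains b = true) ∧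
    (∀ e, eos = some e → (pvInitTable bos eos oov).1.contains e = true) ∧
    (∀ o, oov = some o → (pvInitTable bos eos oov).1.contains o = true) := by
  refine ⟨?_, ?_, ?_⟩ <;> intro x hx <;>
    rcases bos with _ | b <;> rcases eos with _ | e <;> rcases oov with _ | o <;>
    simp only [pvInitTable] <;> (try split_ifs) <;>
    simp_all [PySem.Dict.contains_insert, PySem.Dict.contains_insert_self]

-- ===== VERDICT (by name: the statement is the Claim_ definition above) =====
theorem convert_token_sequences_to_ids_spec : Claim_equal_convert_token_sequences_to_ids := by
  unfold Claim_equal_convert_token_sequences_to_ids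
  intro sequences bos eos oov_thresh oov _ hpre
  unfold Spec_convert_token_sequences_to_ids
  unfold convert_token_sequences_to_ids convert_token_sequences_to_ids_alt
  dsimp only
  obtain ⟨hb, he, ho⟩ := pvInit_contains bos eos oov
  rw [pvCounts_eq]
  have hlow : ∀ seq ∈ sequences, ∀ tok ∈ seq,
      (pvCountsB sequences).getD tok 0 ≤ oov_thresh → oov.isSome = true := by
    intro seq hs tok htk hle
    cases hoo : oov with
    | some o => rfl
    | none =>
      have hm : tok ∈ sequences.flatten := List.mem_flatten.mpr ⟨seq, hs, htk⟩
      have hgt := hpre hoo tok hm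
      rw [pvCountsB_getD] at hle
      omega
  rw [pvEmit_seqs (pvCountsB sequences) oov_thresh bos eos oov
      ((sequences.foldl (fun st seq => seq.foldl (pvBuildTok (pvCountsB sequences) oov_thresh) st)
        ((pvInitTable bos eos oov).1, (pvInitTable bos eos oov).2)).1)
      sequences (pvInitTable bos eos oov).1 (pvInitTable bos eos oov).2 [] hlow ho hb he
      (pvExt_refl _)]
  rcases bos with _ | b <;> rcases eos with _ | e <;> simp [pvHeadB]
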